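-- pv_equiv track=rewrite | github.com/guys/Submarines | Game/user_io.py | _calculate_submarine_positions_by_start_and_direction
-- ===== SOURCE A (Python) =====
-- DIRECTION_TO_POSITION_CHANGE = {
--     "left": (-1, 0),
--     "right": (1, 0),
--     "up": (0, -1),
--     "down": (0, 1)
-- }
--
-- def _calculate_submarine_positions_by_start_and_direction(submarine_size, starting_pos, direction):
--     """
--     a function to calculate the positions that the submarine will occupy (done in order to check the validity)
--     :param int submarine_size: the size of the submarine
--     :param tuple starting_pos: the starting x and y of the submarine
--     :param str direction: the direction of the submarine
--     :return: a list of tuples of the positions that the submarine will occupy.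
--     """
--     current_position = list(starting_pos)
--     occupied_positions = [starting_pos]
--     for _ in range(submarine_size - 1):
--         current_position[0] += DIRECTION_TO_POSITION_CHANGE[direction][0]
--         current_position[1] += DIRECTION_TO_POSITION_CHANGE[direction][1]
--         occupied_positions.append(tuple(current_position))
--
--     return occupied_positions
-- ===== SOURCE B (Python) =====
-- DIRECTION_TO_POSITION_CHANGE = {
--     "left": (-1, 0),
--     "right": (1, 0),
--     "up": (0, -1),
--     "down": (0, 1)
-- }
--
-- def _calculate_submarine_positions_by_start_and_direction(submarine_size, starting_pos, direction):
--     x, y = starting_pos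
--     return [starting_pos] + [
--         (x + i * DIRECTION_TO_POSITION_CHANGE[direction][0],
--          y + i * DIRECTION_TO_POSITION_CHANGE[direction][1])
--         for i in range(1, submarine_size)
--     ]
-- ===== Notes on version B (the rewrite author's own statement) =====
-- stated objective: idiomatic
-- what changed: Replaces A's mutating running-position loop with a direct closed-form comprehension computing each position as start + i*delta from its index.
import Mathlib
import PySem

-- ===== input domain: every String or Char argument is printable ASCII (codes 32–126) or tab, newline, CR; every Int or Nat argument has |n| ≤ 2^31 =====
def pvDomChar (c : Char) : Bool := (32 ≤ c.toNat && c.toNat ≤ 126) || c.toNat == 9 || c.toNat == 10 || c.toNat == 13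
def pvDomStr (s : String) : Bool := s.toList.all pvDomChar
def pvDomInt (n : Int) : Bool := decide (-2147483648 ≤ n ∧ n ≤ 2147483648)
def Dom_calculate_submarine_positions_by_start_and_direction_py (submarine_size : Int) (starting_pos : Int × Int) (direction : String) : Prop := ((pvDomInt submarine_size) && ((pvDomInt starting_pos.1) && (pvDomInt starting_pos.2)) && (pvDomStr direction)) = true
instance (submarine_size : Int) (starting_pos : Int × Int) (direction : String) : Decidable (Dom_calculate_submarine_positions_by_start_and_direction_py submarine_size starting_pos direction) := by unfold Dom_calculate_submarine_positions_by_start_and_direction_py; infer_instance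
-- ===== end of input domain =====

-- B replaces A's mutating running-position loop with a closed-form comprehension
-- (each position derived as start + i*delta from its index i); objective: idiomatic, same cost.

-- ===== PORT A =====
-- module constant DIRECTION_TO_POSITION_CHANGE (a dict)
def DIRECTION_TO_POSITION_CHANGE : PySem.Dict String (Int × Int) :=
  PySem.Dict.mk [("left", (-1, 0)), ("right", (1, 0)), ("up", (0, -1)), ("down", (0, 1))]

-- A's loop: mutate current_position in place, append a copy each iteration.
-- DIRECTION_TO_POSITION_CHANGE[direction] raises KeyError for an unknown key;
-- Pre_ excludes exactly those inputs, so the total getD form is exact on Pre_.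
def calculate_submarine_positions_by_start_and_direction_py (submarine_size : Int) (starting_pos : Int × Int) (direction : String) : List (Int × Int) :=
  ((PySem.List.pyRange 0 (submarine_size - 1) 1).foldl
    (fun (st : (Int × Int) × List (Int × Int)) _ =>
      ((st.1.1 + (PySem.Dict.getD DIRECTION_TO_POSITION_CHANGE direction (0, 0)).1,
        st.1.2 + (PySem.Dict.getD DIRECTION_TO_POSITION_CHANGE direction (0, 0)).2),
       st.2 ++ [(st.1.1 + (PySem.Dict.getD DIRECTION_TO_POSITION_CHANGE direction (0, 0)).1,
                 st.1.2 + (PySem.Dict.getD DIRECTION_TO_POSITION_CHANGE direction (0, 0)).2)]))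
    (starting_pos, [starting_pos])).2

-- ===== PORT B =====
def calculate_submarine_positions_by_start_and_direction_py_alt (submarine_size : Int) (starting_pos : Int × Int) (direction : String) : List (Int × Int) :=
  [starting_pos] ++ (PySem.List.pyRange 1 submarine_size 1).map (fun i =>
    (starting_pos.1 + i * (PySem.Dict.getD DIRECTION_TO_POSITION_CHANGE direction (0, 0)).1,
     starting_pos.2 + i * (PySem.Dict.getD DIRECTION_TO_POSITION_CHANGE direction (0, 0)).2))

-- ===== PRECONDITION & SPEC =====
-- Pre_ excludes exactly the KeyError inputs: an unknown direction with submarine_size ≥ 2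
-- (both Pythons raise KeyError there).
def Pre_calculate_submarine_positions_by_start_and_direction_py (submarine_size : Int) (starting_pos : Int × Int) (direction : String) : Prop :=
  submarine_size ≤ 1 ∨ direction = "left" ∨ direction = "right" ∨ direction = "up" ∨ direction = "down"
instance (submarine_size : Int) (starting_pos : Int × Int) (direction : String) : Decidable (Pre_calculate_submarine_positions_by_start_and_direction_py submarine_size starting_pos direction) := by unfold Pre_calculate_submarine_positions_by_start_and_direction_py; infer_instance

def pvWitness_calculate_submarine_positions_by_start_and_direction_py : Int × (Int × Int) × String := (3, (2, 5), "down")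

def Spec_calculate_submarine_positions_by_start_and_direction_py (submarine_size : Int) (starting_pos : Int × Int) (direction : String) (out : List (Int × Int)) : Prop := out = calculate_submarine_positions_by_start_and_direction_py_alt submarine_size starting_pos direction
instance (submarine_size : Int) (starting_pos : Int × Int) (direction : String) (out : List (Int × Int)) : Decidable (Spec_calculate_submarine_positions_by_start_and_direction_py submarine_size starting_pos direction out) := by unfold Spec_calculate_submarine_positions_by_start_and_direction_py; infer_instance

-- ===== CLAIM (what is proved, stated in full; the proofs are below) =====
def Claim_equal_calculate_submarine_positions_by_start_and_direction_py : Prop := ∀ (submarine_size : Int) (starting_pos : Int × Int) (direction : String), Dom_calculate_submarine_positions_by_start_and_direction_py submarine_size starting_pos direction → Pre_calculate_submarine_positions_by_start_and_direction_py submarine_size starting_pos direction → Spec_calculate_submarine_positions_by_start_and_direction_py submarine_size starting_pos direction (calculate_submarine_positions_by_start_and_direction_py submarine_size starting_pos direction)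

-- ===== LEMMAS AND PROOFS =====

-- A's loop, run for n steps from position (x, y) with accumulator acc,
-- appends exactly the positions start + (i+1)*delta for i = 0 … n-1.
theorem subA_loop (dx dy : Int) (n : Nat) :
    ∀ (l : List Int), l.length = n → ∀ (x y : Int) (acc : List (Int × Int)),
    (l.foldl
      (fun (st : (Int × Int) × List (Int × Int)) _ =>
        ((st.1.1 + dx, st.1.2 + dy), st.2 ++ [(st.1.1 + dx, st.1.2 + dy)]))
      ((x, y), acc)).2
    = acc ++ (List.range n).map (fun (i : Nat) => (x + ((i : Int) + 1) * dx, y + ((i : Int) + 1) * dy)) := by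
  induction n with
  | zero => intro l hl x y acc; rw [List.length_eq_zero_iff.mp hl]; simp
  | succ m ih =>
    intro l hl x y acc
    match l with
    | [] => simp at hl
    | a :: t =>
      simp only [List.foldl_cons]
      have ht : t.length = m := by simpa using hl
      rw [ih t ht (x + dx) (y + dy)]
      rw [List.range_succ_eq_map, List.map_cons, List.map_map]
      have hmap : List.map (fun i : Nat => (x + dx + ((i : Int) + 1) * dx, y + dy + ((i : Int) + 1) * dy)) (List.range m)
          = List.map ((fun i : Nat => (x + ((i : Int) + 1) * dx, y + ((i : Int) + 1) * dy)) ∘ Nat.succ) (List.range m) := by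
        apply List.map_congr_left; intro i _
        simp only [Function.comp_apply, Prod.mk.injEq]
        push_cast
        constructor <;> ring
      rw [← hmap]
      have hhead : ((x + dx : Int), (y + dy : Int)) = (x + (((0 : Nat) : Int) + 1) * dx, y + (((0 : Nat) : Int) + 1) * dy) := by
        simp only [Nat.cast_zero, Prod.mk.injEq]
        constructor <;> ring
      rw [hhead]; simp

theorem subs_eq (submarine_size : Int) (starting_pos : Int × Int) (direction : String) :
    calculate_submarine_positions_by_start_and_direction_py submarine_size starting_pos direction
    = calculate_submarine_positions_by_start_and_direction_py_alt submarine_size starting_pos direction := by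
  obtain ⟨x, y⟩ := starting_pos
  unfold calculate_submarine_positions_by_start_and_direction_py
    calculate_submarine_positions_by_start_and_direction_py_alt
  set ch := PySem.Dict.getD DIRECTION_TO_POSITION_CHANGE direction (0, 0) with hch
  rw [subA_loop ch.1 ch.2 ((submarine_size - 1 - 0).toNat)
        (PySem.List.pyRange 0 (submarine_size - 1) 1)
        (by rw [PySem.List.length_pyRange_one]) x y [(x, y)]]
  rw [PySem.List.pyRange_one]
  simp only [List.map_map]
  congr 1
  have htn : (submarine_size - 1 - 0).toNat = (submarine_size - 1).toNat := by norm_num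
  rw [htn]
  apply List.map_congr_left
  intro i _
  simp only [Function.comp, Prod.mk.injEq]
  constructor <;> ring

-- ===== VERDICT (by name: the statement is the Claim_ definition above) =====
theorem calculate_submarine_positions_by_start_and_direction_py_spec : Claim_equal_calculate_submarine_positions_by_start_and_direction_py := by
  intro submarine_size starting_pos direction _ _
  exact subs_eq submarine_size starting_pos direction
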